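-- pv_equiv track=rewrite | github.com/burundai-t/finite-row-graded-magmas-over-f3 | L3/scripts/verify_layer3_frontE.py | block_deps
-- ===== SOURCE A (Python) =====
-- import itertools
-- from collections import Counter, defaultdict
-- from typing import Dict, Iterable, List, Sequence, Tuple
--
-- S3 = range(3)
--
-- def block_deps(block: str) -> str:
--     # block is indexed by (owner column, other column). Return dependence bits owner/other.
--     bits = []
--     for coord in [0, 1]:
--         groups: Dict[int, set[str]] = defaultdict(set)
--         yes = False
--         for a, b in itertools.product(S3, repeat=2):
--             key = b if coord == 0 else a
--             groups[key].add(block[a * 3 + b])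
--             if len(groups[key]) > 1:
--                 yes = True
--         bits.append("1" if yes else "0")
--     return "".join(bits)
-- ===== SOURCE B (Python) =====
-- def block_deps(block: str) -> str:
--     # Direct 3x3 grid test: a bit is '1' iff some column (resp. row) is not uniform.
--     col = any(block[j] != block[3 + j] or block[3 + j] != block[6 + j] for j in range(3))
--     row = any(block[3 * r] != block[3 * r + 1] or block[3 * r + 1] != block[3 * r + 2] for r in range(3))
--     return ("1" if col else "0") + ("1" if row else "0")
-- ===== Notes on version B (the rewrite author's own statement) =====
-- stated objective: simpler
-- what changed: Replaced the coord-loop over itertools.product with a defaultdict of sets and a monotone flag by two direct any-comparisons: a column/row is dependent iff its three characters are not all equal, tested with plain != on block[r*3+c].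
import Mathlib
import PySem

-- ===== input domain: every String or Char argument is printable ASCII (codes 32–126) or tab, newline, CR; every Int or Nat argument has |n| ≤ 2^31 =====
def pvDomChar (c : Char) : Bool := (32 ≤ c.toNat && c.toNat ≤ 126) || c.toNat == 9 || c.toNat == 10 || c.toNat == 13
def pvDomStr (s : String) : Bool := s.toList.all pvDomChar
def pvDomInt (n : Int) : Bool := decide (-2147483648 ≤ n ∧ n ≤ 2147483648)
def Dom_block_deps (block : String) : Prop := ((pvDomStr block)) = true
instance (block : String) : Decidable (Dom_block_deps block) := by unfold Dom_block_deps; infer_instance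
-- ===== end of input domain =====

-- B replaces A's defaultdict-of-sets grouping by twelve direct character comparisons (simpler).

-- ===== PORT A =====
-- block[a*3+b]; total form via getD, exact under Pre_ (index 0..8 in range)
def pvCharAt (block : String) (i : Int) : Char :=
  (PySem.Str.pyGet? block i).getD 'A'

def block_deps (block : String) : String :=
  let bits : List String := [(0 : Int), 1].foldl (fun bits coord =>
    -- itertools.product(S3, repeat=2)
    let pairs : List (Int × Int) :=
      (PySem.List.pyRange 0 3 1).flatMap (fun a => (PySem.List.pyRange 0 3 1).map (fun b => (a, b)))
    let st := pairs.foldl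
      (fun (st : PySem.Dict Int (PySem.Set Char) × Bool) ab =>
        let groups := st.1
        let yes := st.2
        let key : Int := if coord == 0 then ab.2 else ab.1
        let groups := groups.modify key PySem.Set.empty
          (fun s => PySem.Set.add s (pvCharAt block (ab.1 * 3 + ab.2)))
        let yes := if PySem.Set.len (groups.getD key PySem.Set.empty) > 1 then true else yes
        (groups, yes))
      (PySem.Dict.empty, false)
    bits ++ [if st.2 then "1" else "0"]) []
  PySem.Str.join "" bits

-- ===== PORT B =====
def pvCharAtB (block : String) (i : Int) : Char :=
  (PySem.Str.pyGet? block i).getD 'A'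

def block_deps_alt (block : String) : String :=
  let col := (PySem.List.pyRange 0 3 1).any (fun j =>
    pvCharAtB block j != pvCharAtB block (3 + j) || pvCharAtB block (3 + j) != pvCharAtB block (6 + j))
  let row := (PySem.List.pyRange 0 3 1).any (fun r =>
    pvCharAtB block (3 * r) != pvCharAtB block (3 * r + 1) ||
      pvCharAtB block (3 * r + 1) != pvCharAtB block (3 * r + 2))
  (if col then "1" else "0") ++ (if row then "1" else "0")

-- ===== PRECONDITION & SPEC =====
-- A raises IndexError (block[a*3+b] for indices up to 8) when the string has fewer than 9 characters.
def Pre_block_deps (block : String) : Prop := 9 ≤ block.toList.length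
instance (block : String) : Decidable (Pre_block_deps block) := by unfold Pre_block_deps; infer_instance
def pvWitness_block_deps : String := "abcabcabc"

def Spec_block_deps (block : String) (out : String) : Prop := out = block_deps_alt block
instance (block : String) (out : String) : Decidable (Spec_block_deps block out) := by unfold Spec_block_deps; infer_instance

-- ===== CLAIM (what is proved, stated in full; the proofs are below) =====
def Claim_equal_block_deps : Prop := ∀ (block : String), Dom_block_deps block → Pre_block_deps block → Spec_block_deps block (block_deps block)

-- ===== LEMMAS AND PROOFS =====

lemma pv_len_pair (x y : Char) : (1 < List.length (if y = x then [x] else [x, y])) ↔ ¬ y = x := by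
  by_cases h : y = x <;> simp [h]

lemma pv_len_tri (x y z : Char) :
    (1 < List.length (if z ∈ (if y = x then [x] else [x, y]) then (if y = x then [x] else [x, y])
        else (if y = x then [x] else [x, y]) ++ [z])) ↔ (¬ y = x ∨ ¬ z = x) := by
  by_cases h1 : y = x <;> by_cases h2 : z = x <;> by_cases h3 : z = y <;> simp_all

lemma pv_col (x y z : Char) : ((¬ y = x ∨ ¬ z = x)) ↔ (¬ x = y ∨ ¬ y = z) := by
  by_cases h1 : x = y <;> by_cases h2 : y = z <;> by_cases h3 : x = z <;> simp_all [eq_comm]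

lemma pv_flip (a b : Char) : (¬ a = b) = (¬ b = a) :=
  propext ⟨fun h h' => h h'.symm, fun h h' => h h'.symm⟩

lemma pv_or0 (c0 c1 c2 c3 c4 c5 c6 c7 c8 : Char) : ((¬c2 = c5 ∨ ¬c5 = c8) ∨ (¬c1 = c4 ∨ ¬c4 = c7) ∨ (¬c0 = c3 ∨ ¬c3 = c6) ∨
      ¬c5 = c2 ∨ ¬c4 = c1 ∨ ¬c3 = c0) ↔
    ((¬c0 = c3 ∨ ¬c3 = c6) ∨ (¬c1 = c4 ∨ ¬c4 = c7) ∨ ¬c2 = c5 ∨ ¬c5 = c8) := by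
  simp only [pv_flip c5 c2, pv_flip c4 c1, pv_flip c3 c0]
  tauto

lemma pv_or1 (c0 c1 c2 c3 c4 c5 c6 c7 c8 : Char) : ((¬c6 = c7 ∨ ¬c7 = c8) ∨ ¬c7 = c6 ∨ (¬c3 = c4 ∨ ¬c4 = c5) ∨ ¬c4 = c3 ∨
      (¬c0 = c1 ∨ ¬c1 = c2) ∨ ¬c1 = c0) ↔
    ((¬c0 = c1 ∨ ¬c1 = c2) ∨ (¬c3 = c4 ∨ ¬c4 = c5) ∨ ¬c6 = c7 ∨ ¬c7 = c8) := by
  simp only [pv_flip c7 c6, pv_flip c4 c3, pv_flip c1 c0]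
  tauto

-- ===== VERDICT (by name: the statement is the Claim_ definition above) =====
set_option maxHeartbeats 1600000 in
theorem block_deps_spec : Claim_equal_block_deps := by
  intro block _ hpre
  unfold Spec_block_deps
  rcases h : block.toList with _ | ⟨c0, _ | ⟨c1, _ | ⟨c2, _ | ⟨c3, _ | ⟨c4, _ | ⟨c5, _ | ⟨c6, _ | ⟨c7, _ | ⟨c8, rest⟩⟩⟩⟩⟩⟩⟩⟩⟩ <;>
    simp_all only [Pre_block_deps, List.length_nil, List.length_cons] <;> try omega
  have hr : PySem.List.pyRange 0 3 1 = [0, 1, 2] := by decide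
  have e0 : pvCharAt block 0 = c0 := by simp [pvCharAt, h, PySem.List.pyGet?, PySem.List.pyIdx?]; rw [if_pos (by omega)]; simp
  have e1 : pvCharAt block 1 = c1 := by simp [pvCharAt, h, PySem.List.pyGet?, PySem.List.pyIdx?]; rw [if_pos (by omega)]; simp
  have e2 : pvCharAt block 2 = c2 := by simp [pvCharAt, h, PySem.List.pyGet?, PySem.List.pyIdx?]; rw [if_pos (by omega)]; simp
  have e3 : pvCharAt block 3 = c3 := by simp [pvCharAt, h, PySem.List.pyGet?, PySem.List.pyIdx?]; rw [if_pos (by omega)]; simp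
  have e4 : pvCharAt block 4 = c4 := by simp [pvCharAt, h, PySem.List.pyGet?, PySem.List.pyIdx?]; rw [if_pos (by omega)]; simp
  have e5 : pvCharAt block 5 = c5 := by simp [pvCharAt, h, PySem.List.pyGet?, PySem.List.pyIdx?]; rw [if_pos (by omega)]; simp
  have e6 : pvCharAt block 6 = c6 := by simp [pvCharAt, h, PySem.List.pyGet?, PySem.List.pyIdx?]; rw [if_pos (by omega)]; simp
  have e7 : pvCharAt block 7 = c7 := by simp [pvCharAt, h, PySem.List.pyGet?, PySem.List.pyIdx?]; rw [if_pos (by omega)]; simp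
  have e8 : pvCharAt block 8 = c8 := by simp [pvCharAt, h, PySem.List.pyGet?, PySem.List.pyIdx?]; rw [if_pos (by omega)]; simp
  have f0 : pvCharAtB block 0 = c0 := e0
  have f1 : pvCharAtB block 1 = c1 := e1
  have f2 : pvCharAtB block 2 = c2 := e2
  have f3 : pvCharAtB block 3 = c3 := e3
  have f4 : pvCharAtB block 4 = c4 := e4
  have f5 : pvCharAtB block 5 = c5 := e5
  have f6 : pvCharAtB block 6 = c6 := e6
  have f7 : pvCharAtB block 7 = c7 := e7
  have f8 : pvCharAtB block 8 = c8 := e8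
  simp only [block_deps, block_deps_alt, hr, List.foldl_cons, List.foldl_nil,
    List.any_cons, List.any_nil]
  norm_num [e0, e1, e2, e3, e4, e5, e6, e7, e8, f0, f1, f2, f3, f4, f5, f6, f7, f8,
    PySem.Dict.modify, PySem.Dict.getD, PySem.Dict.get?, PySem.Dict.insert, PySem.Dict.contains,
    PySem.Dict.empty, PySem.Dict.items, PySem.Set.add, PySem.Set.empty, PySem.Set.len,
    PySem.Set.contains, PySem.Str.join, PySem.Chars.join]
  simp only [pv_len_pair, pv_len_tri, pv_col]
  simp only [pv_or0 c0 c1 c2 c3 c4 c5 c6 c7 c8, pv_or1 c0 c1 c2 c3 c4 c5 c6 c7 c8]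
  split_ifs <;> rfl
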